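-- pv_equiv track=rewrite | github.com/mt-tass/Advent-of-Code-25-FPGA | Day_3/solution_python/solution.py | get_joltage
-- ===== SOURCE A (Python) =====
-- def get_joltage(line : str) -> int:
--     num1 = line[0]
--     num2 = "0"
--     count = 0
--     for char in line[1:] :
--         count += 1
--         if (char > num1) and (count != len(line) - 1):
--             num1 = char
--             num2 = "0"
--             continue
--         elif (char > num2):
--             num2 = char
--     ans = 10*int(num1) + int(num2)
--     return ans
-- ===== SOURCE B (Python) =====
-- def get_joltage(line: str) -> int:
--     prefix = line[:-1] if len(line) > 1 else line
--     num1 = max(prefix)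
--     p = prefix.index(num1)
--     num2 = max("0" + line[p + 1:])
--     return 10 * int(num1) + int(num2)
-- ===== Notes on version B (the rewrite author's own statement) =====
-- stated objective: simpler
-- what changed: Replaced A's promote/reset state machine (running num1/num2 with a positional last-char guard) by a direct decomposition: take the max of line[:-1], locate its first occurrence, and take the max of the suffix after it floored by '0'.
import Mathlib
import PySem

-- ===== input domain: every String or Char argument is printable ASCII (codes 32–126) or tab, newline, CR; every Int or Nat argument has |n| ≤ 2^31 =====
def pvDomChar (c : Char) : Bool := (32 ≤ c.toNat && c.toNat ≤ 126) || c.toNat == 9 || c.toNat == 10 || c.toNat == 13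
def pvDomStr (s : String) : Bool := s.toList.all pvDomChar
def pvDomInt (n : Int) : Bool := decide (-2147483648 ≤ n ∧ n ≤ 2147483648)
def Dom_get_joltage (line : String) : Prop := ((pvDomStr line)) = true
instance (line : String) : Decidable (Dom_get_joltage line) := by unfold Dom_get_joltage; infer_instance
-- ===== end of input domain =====

-- B restates A's promote/reset running-max state machine as max-of-prefix / first index / max-of-suffix (objective: simpler).

-- ===== PORT A =====
-- int(c) for the one-character strings both Pythons pass to int(); .getD 0 is unreachable under Pre_ (int() raises ValueError there).
def pyIntChar (c : Char) : Int := (PySem.Int.ofChars? [c]).getD 0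

-- the loop body of A, with state (num1, num2, count); N = len(line)
def stepA (N : Int) (s : Char × Char × Int) (ch : Char) : Char × Char × Int :=
  let count := s.2.2 + 1
  if s.1 < ch ∧ count ≠ N - 1 then (ch, '0', count)
  else if s.2.1 < ch then (s.1, ch, count)
  else (s.1, s.2.1, count)

def get_joltage (line : String) : Int :=
  let cs := line.toList
  let num1 := (PySem.List.pyGet? cs 0).getD '0'  -- line[0]; none = IndexError, excluded by Pre_
  let st := (PySem.List.slice cs (some 1) none).foldl (stepA (cs.length : Int)) (num1, '0', (0 : Int))
  10 * pyIntChar st.1 + pyIntChar st.2.1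

-- ===== PORT B =====
def get_joltage_alt (line : String) : Int :=
  let cs := line.toList
  let pre := if 1 < cs.length then PySem.List.slice cs none (some (-1)) else cs
  let num1 := (PySem.List.max? pre (fun c => c)).getD '0'  -- max(prefix); none = ValueError on empty, excluded by Pre_
  let p := (PySem.List.index? pre num1).getD 0             -- prefix.index(num1); num1 ∈ prefix, so always some
  let num2 := (PySem.List.max? ('0' :: PySem.List.slice cs (some ((p : Int) + 1)) none) (fun c => c)).getD '0'
  10 * pyIntChar num1 + pyIntChar num2

-- ===== PRECONDITION & SPEC =====
-- Exactly the inputs on which A returns: the empty string raises IndexError, and int() raises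
-- ValueError unless both selected characters are digits, which happens exactly when every
-- character is ≤ '9' and line[:-1] (line itself when len = 1) contains some character ≥ '0'.
def Pre_get_joltage (line : String) : Prop :=
  line.toList ≠ [] ∧
  line.toList.all (fun c => c.toNat ≤ '9'.toNat) = true ∧
  (if 1 < line.toList.length then line.toList.dropLast else line.toList).any
      (fun c => '0'.toNat ≤ c.toNat) = true
instance (line : String) : Decidable (Pre_get_joltage line) := by unfold Pre_get_joltage; infer_instance
def pvWitness_get_joltage : String := "3815"
def Spec_get_joltage (line : String) (out : Int) : Prop := out = get_joltage_alt line
instance (line : String) (out : Int) : Decidable (Spec_get_joltage line out) := by unfold Spec_get_joltage; infer_instance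

-- ===== CLAIM (what is proved, stated in full; the proofs are below) =====
def Claim_equal_get_joltage : Prop := ∀ (line : String), Dom_get_joltage line → Pre_get_joltage line → Spec_get_joltage line (get_joltage line)

-- ===== LEMMAS AND PROOFS =====

lemma idxOf?_of_mem (l : List Char) (v : Char) (h : v ∈ l) : l.idxOf? v = some (l.idxOf v) := by
  induction l with
  | nil => simp at h
  | cons c t ih =>
    by_cases hc : c = v
    · subst hc; simp [List.idxOf?_cons, List.idxOf_cons_self]
    · rcases List.mem_cons.1 h with rfl | ht
      · exact absurd rfl hc
      · rw [List.idxOf_cons_ne _ hc]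
        simp [List.idxOf?_cons, hc, ih ht]

lemma foldl_max_all_le {t : List Char} {a : Char} (h : ∀ x ∈ t, x ≤ a) :
    t.foldl max a = a := by
  induction t with
  | nil => rfl
  | cons c t' ih =>
    have hc : c ≤ a := h c (by simp)
    simp only [List.foldl_cons, max_eq_left hc]
    exact ih fun x hx => h x (by simp [hx])

-- A's loop body during the prefix phase (where count ≠ len-1 always holds).
def phase1 (s : Char × Char) (c : Char) : Char × Char :=
  if s.1 < c then (c, '0') else if s.2 < c then (s.1, c) else s

lemma phase1_inv : ∀ (t : List Char) (a b : Char),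
    t.foldl phase1 (a, b) =
      (t.foldl max a,
       if ∀ c ∈ t, c ≤ a then t.foldl max b
       else (t.drop (t.idxOf (t.foldl max a) + 1)).foldl max '0') := by
  intro t
  induction t with
  | nil => intro a b; simp
  | cons c t' ih =>
    intro a b
    by_cases h : a < c
    · have hmax : max a c = c := max_eq_right h.le
      have hstep : phase1 (a, b) c = (c, '0') := by simp [phase1, h]
      have hnot : ¬ ∀ x ∈ c :: t', x ≤ a := by
        push Not; exact ⟨c, by simp, h⟩
      simp only [List.foldl_cons, hstep, hmax, if_neg hnot]
      rw [ih c '0']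
      by_cases h2 : ∀ x ∈ t', x ≤ c
      · have hMc : t'.foldl max c = c := foldl_max_all_le h2
        rw [if_pos h2, hMc, List.idxOf_cons_self]
        simp
      · have hlt : c < t'.foldl max c := by
          push Not at h2
          obtain ⟨x, hx, hcx⟩ := h2
          exact lt_of_lt_of_le hcx ((PySem.List.le_foldl_max t' c).2 x hx)
        rw [if_neg h2, List.idxOf_cons_ne _ (ne_of_lt hlt), Nat.succ_eq_add_one]
        simp
    · have hca : c ≤ a := le_of_not_gt h
      have hstep : phase1 (a, b) c = (a, max b c) := by
        by_cases hb : b < c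
        · simp [phase1, h, hb, max_eq_right hb.le]
        · simp [phase1, h, hb, max_eq_left (le_of_not_gt hb)]
      have hcond : (∀ x ∈ c :: t', x ≤ a) ↔ (∀ x ∈ t', x ≤ a) := by
        simp [hca]
      simp only [List.foldl_cons, hstep, max_eq_left hca, hcond]
      rw [ih a (max b c)]
      by_cases h2 : ∀ x ∈ t', x ≤ a
      · rw [if_pos h2, if_pos h2]
      · have hlt : a < t'.foldl max a := by
          push Not at h2
          obtain ⟨x, hx, hax⟩ := h2
          exact lt_of_lt_of_le hax ((PySem.List.le_foldl_max t' a).2 x hx)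
        have hne : c ≠ t'.foldl max a := ne_of_lt (lt_of_le_of_lt hca hlt)
        rw [if_neg h2, if_neg h2, List.idxOf_cons_ne _ hne, Nat.succ_eq_add_one]
        simp

lemma stepA_count (N : Int) : ∀ (l : List Char) (a b : Char) (k : Int),
    k + l.length < N - 1 →
    l.foldl (stepA N) (a, b, k) =
      ((l.foldl phase1 (a, b)).1, (l.foldl phase1 (a, b)).2, k + l.length) := by
  intro l
  induction l with
  | nil => intro a b k _; simp
  | cons ch l' ih =>
    intro a b k hk
    have hne : k + 1 ≠ N - 1 := by
      simp only [List.length_cons] at hk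
      push_cast at hk ⊢
      omega
    have hstep : stepA N (a, b, k) ch =
        ((phase1 (a, b) ch).1, (phase1 (a, b) ch).2, k + 1) := by
      simp only [stepA, phase1]
      by_cases h1 : a < ch
      · simp [h1, hne]
      · by_cases h2 : b < ch <;> simp [h1, h2]
    simp only [List.foldl_cons, hstep]
    rw [ih _ _ (k + 1) (by simp only [List.length_cons] at hk; push_cast at hk ⊢; omega)]
    simp only [List.length_cons, Prod.mk.injEq]
    refine ⟨trivial, trivial, by push_cast; ring⟩

-- ===== VERDICT (by name: the statement is the Claim_ definition above) =====
theorem get_joltage_spec : Claim_equal_get_joltage := by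
  intro line _ hpre
  obtain ⟨hne, _hle9, _hdig⟩ := hpre
  unfold Spec_get_joltage
  obtain ⟨c0, rest, hcs⟩ := List.exists_cons_of_ne_nil hne
  rcases List.eq_nil_or_concat rest with rfl | ⟨mid, z, rfl⟩
  all_goals try simp only [List.concat_eq_append] at hcs
  · -- length-1 line
    simp [get_joltage, get_joltage_alt, hcs, PySem.List.max?_id_cons,
      PySem.List.index?_eq_idxOf?, PySem.List.slice, PySem.List.clampIdx, List.idxOf?_cons]
  · -- line = c0 :: mid ++ [z]
    have hcs' : line.toList = (c0 :: mid) ++ [z] := by simp [hcs]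
    -- the A side
    set P := mid.foldl phase1 (c0, '0') with hP
    have hA : get_joltage line = 10 * pyIntChar P.1 + pyIntChar (max P.2 z) := by
      have hN2 : (((c0 :: (mid ++ [z])).length : Nat) : Int) = (mid.length : Int) + 2 := by
        simp; omega
      have hfin : ∀ c2 : Char,
          stepA ((mid.length : Int) + 2) (P.1, c2, 0 + (mid.length : Int)) z =
            (P.1, max c2 z, 0 + (mid.length : Int) + 1) := by
        intro c2
        simp only [stepA]
        split_ifs with h1 h2
        · exact absurd (by ring) h1.2
        · simp [max_eq_right h2.le]
        · simp [max_eq_left (le_of_not_gt h2)]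
      simp only [get_joltage, hcs, PySem.List.pyGet?_zero_cons, Option.getD_some,
        PySem.List.slice_from_one, List.tail_cons]
      rw [List.foldl_append]
      rw [stepA_count _ mid c0 '0' 0 (by rw [hN2]; omega)]
      rw [hN2, ← hP]
      simp only [List.foldl_cons, List.foldl_nil]
      rw [hfin P.2]
    -- the B side
    have hlen : 1 < line.toList.length := by rw [hcs']; simp
    set M := mid.foldl max c0 with hM
    have hMmem : M ∈ c0 :: mid := by
      rcases PySem.List.foldl_max_mem mid c0 with h | h
      · rw [hM, h]; exact List.mem_cons_self
      · exact List.mem_cons_of_mem _ (by rw [hM]; exact h)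
    set p := (c0 :: mid).idxOf M with hp
    have hB : get_joltage_alt line =
        10 * pyIntChar M + pyIntChar ((line.toList.drop (p + 1)).foldl max '0') := by
      simp only [get_joltage_alt, if_pos hlen]
      rw [show PySem.List.slice line.toList none (some (-1)) = (c0 :: mid) from by
        rw [hcs', PySem.List.slice_to_neg_one, List.dropLast_concat]]
      rw [PySem.List.max?_id_cons, Option.getD_some, ← hM,
        PySem.List.index?_eq_idxOf?, idxOf?_of_mem _ _ hMmem, Option.getD_some, ← hp]
      rw [show ((p : Int) + 1) = ((p + 1 : Nat) : Int) from by push_cast; ring,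
        PySem.List.slice_from_natCast, PySem.List.max?_id_cons, Option.getD_some]
    rw [hA, hB]
    -- identify the two (num1, num2) pairs via the loop invariant
    rw [phase1_inv] at hP
    by_cases h2 : ∀ x ∈ mid, x ≤ c0
    · have hMC : M = c0 := by rw [hM]; exact foldl_max_all_le h2
      have hp0 : p = 0 := by rw [hp, hMC]; exact List.idxOf_cons_self
      have hP1 : P.1 = M := by rw [hP, hM]
      have hP2 : P.2 = mid.foldl max '0' := by rw [hP]; simp [if_pos h2]
      rw [hP1, hP2, hp0, hcs']
      rw [show ((c0 :: mid) ++ [z]).drop (0 + 1) = mid ++ [z] from rfl]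
      rw [List.foldl_append]
      simp
    · have hc0M : c0 < M := by
        push Not at h2
        obtain ⟨x, hx, hcx⟩ := h2
        exact lt_of_lt_of_le hcx ((PySem.List.le_foldl_max mid c0).2 x hx)
      have hMin : M ∈ mid := by
        rcases List.mem_cons.1 hMmem with h | h
        · exact absurd h.symm (ne_of_lt hc0M)
        · exact h
      set j := mid.idxOf M with hj
      have hpj : p = j + 1 := by
        rw [hp, List.idxOf_cons_ne _ (ne_of_lt hc0M), hj]
      have hjlt : j < mid.length := by rw [hj]; exact List.idxOf_lt_length_of_mem hMin
      have hP1 : P.1 = M := by rw [hP, hM]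
      have hP2 : P.2 = (mid.drop (j + 1)).foldl max '0' := by
        rw [hP]; simp only [if_neg h2]
      rw [hP1, hP2, hpj, hcs']
      rw [show ((c0 :: mid) ++ [z]).drop (j + 1 + 1) = (mid ++ [z]).drop (j + 1) from rfl]
      rw [List.drop_append_of_le_length (by omega), List.foldl_append]
      simp
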